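-- pv_equiv track=rewrite | github.com/Sawiru/Codewars | 8kyu/are-they-opposite.py | is_opposite
-- ===== SOURCE A (Python) =====
-- def is_opposite(s1,s2):
--     if not s1 or not s2:
--         return False
--     if len(s1) != len(s2):
--         return False
--
--     for c1, c2 in zip(s1,s2):
--         if c1.lower() != c2.lower() or c1 == c2:
--             return False
--
--     return True
-- ===== SOURCE B (Python) =====
-- def is_opposite(s1, s2):
--     if len(s1) != len(s2) or not s1:
--         return False
--
--     def go(t1, t2):
--         if not t1:
--             return True
--         return t1[0].isalpha() and ord(t1[0]) ^ 32 == ord(t2[0]) and go(t1[1:], t2[1:])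
--
--     return go(s1, s2)
-- ===== Notes on version B (the rewrite author's own statement) =====
-- stated objective: alternative
-- what changed: Replaced the lowercase-and-compare fused loop by a recursion on the two strings that tests each pair arithmetically: the first char must be a letter and its code XOR 32 must equal the other char's code (case-flip bit), with the length/emptiness guard hoisted to one upfront check; no lowercasing anywhere.
import Mathlib
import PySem

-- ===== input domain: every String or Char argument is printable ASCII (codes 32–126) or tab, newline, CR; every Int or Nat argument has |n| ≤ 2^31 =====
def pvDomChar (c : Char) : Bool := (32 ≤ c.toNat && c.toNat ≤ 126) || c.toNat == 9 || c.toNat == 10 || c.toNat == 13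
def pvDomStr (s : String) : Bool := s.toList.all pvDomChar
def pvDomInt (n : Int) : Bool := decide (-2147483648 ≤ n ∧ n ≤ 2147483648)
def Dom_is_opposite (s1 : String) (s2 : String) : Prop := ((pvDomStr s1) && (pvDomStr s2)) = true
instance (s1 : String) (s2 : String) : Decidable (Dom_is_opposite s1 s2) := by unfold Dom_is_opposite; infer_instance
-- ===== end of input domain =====

-- B replaces A's lowercase-and-compare loop by a recursion over the two strings that tests each
-- character pair arithmetically (letter check + XOR-32 case-flip of the code): alternative algorithm.


-- ===== PORT A =====
-- the 'for c1, c2 in zip(s1, s2)' loop with its early 'return False'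
def isOppositeLoopA : List (Char × Char) → Bool
  | [] => true
  | (c1, c2) :: rest =>
    if PySem.Chars.lowerChar c1 ≠ PySem.Chars.lowerChar c2 || c1 == c2 then false
    else isOppositeLoopA rest

def is_opposite (s1 : String) (s2 : String) : Bool :=
  if s1.toList.isEmpty || s2.toList.isEmpty then false
  else if s1.toList.length ≠ s2.toList.length then false
  else isOppositeLoopA (s1.toList.zip s2.toList)

-- ===== PORT B =====
-- B's inner 'go(t1, t2)': recursion on the strings, per-pair arithmetic test
-- (t1[0].isalpha() and ord(t1[0]) ^ 32 == ord(t2[0])).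
def isOppositeGoB : List Char → List Char → Bool
  | [], _ => true
  | c1 :: t1, t2 =>
    match t2 with
    | [] => false  -- unreachable: go is only called with equal-length strings (Python would raise IndexError)
    | c2 :: t2' =>
      PySem.Chars.isalpha c1 && (c1.toNat ^^^ 32 == c2.toNat) && isOppositeGoB t1 t2'

def is_opposite_alt (s1 : String) (s2 : String) : Bool :=
  if s1.toList.length ≠ s2.toList.length || s1.toList.isEmpty then false
  else isOppositeGoB s1.toList s2.toList

-- ===== PRECONDITION & SPEC =====
def Spec_is_opposite (s1 : String) (s2 : String) (out : Bool) : Prop := out = is_opposite_alt s1 s2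
instance (s1 : String) (s2 : String) (out : Bool) : Decidable (Spec_is_opposite s1 s2 out) := by unfold Spec_is_opposite; infer_instance

-- ===== CLAIM =====
def Claim_equal_is_opposite : Prop := ∀ (s1 : String) (s2 : String), Dom_is_opposite s1 s2 → Spec_is_opposite s1 s2 (is_opposite s1 s2)

-- ===== LEMMAS AND PROOFS =====

lemma char_eq_iff (c d : Char) : (c = d) ↔ c.toNat = d.toNat := by
  constructor
  · intro h; rw [h]
  · intro h; exact Char.ext (by exact_mod_cast UInt32.toNat_inj.mp h)

lemma toNat_ofNat_small (n : Nat) (h : n < 128) : (Char.ofNat n).toNat = n := by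
  rw [Char.toNat_ofNat, if_pos]; unfold Nat.isValidChar; left; omega

-- On ASCII codes, B's arithmetic test equals the negation of A's skip condition: checked code by code.
set_option maxHeartbeats 1000000 in
set_option maxRecDepth 10000 in
lemma perchar_nat : ∀ n1 < 128, ∀ n2 < 128,
    (PySem.Chars.isalpha (Char.ofNat n1) && ((Char.ofNat n1).toNat ^^^ 32 == (Char.ofNat n2).toNat))
      = !(decide (PySem.Chars.lowerChar (Char.ofNat n1) ≠ PySem.Chars.lowerChar (Char.ofNat n2)) || Char.ofNat n1 == Char.ofNat n2) := by
  decide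

lemma perchar (c1 c2 : Char) (h1 : pvDomChar c1 = true) (h2 : pvDomChar c2 = true) :
    (PySem.Chars.isalpha c1 && (c1.toNat ^^^ 32 == c2.toNat))
      = !(decide (PySem.Chars.lowerChar c1 ≠ PySem.Chars.lowerChar c2) || c1 == c2) := by
  have hd1 : c1.toNat < 128 := by
    simp only [pvDomChar, Bool.or_eq_true, Bool.and_eq_true, decide_eq_true_eq, beq_iff_eq] at h1
    omega
  have hd2 : c2.toNat < 128 := by
    simp only [pvDomChar, Bool.or_eq_true, Bool.and_eq_true, decide_eq_true_eq, beq_iff_eq] at h2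
    omega
  have e1 : Char.ofNat c1.toNat = c1 := (char_eq_iff _ _).mpr (toNat_ofNat_small _ hd1)
  have e2 : Char.ofNat c2.toNat = c2 := (char_eq_iff _ _).mpr (toNat_ofNat_small _ hd2)
  have h := perchar_nat c1.toNat hd1 c2.toNat hd2
  rwa [e1, e2] at h

-- On equal-length ASCII lists, A's fused loop over the zip equals B's two-list recursion.
lemma loop_eq : ∀ l1 l2 : List Char, l1.length = l2.length →
    l1.all pvDomChar = true → l2.all pvDomChar = true →
    isOppositeLoopA (l1.zip l2) = isOppositeGoB l1 l2 := by
  intro l1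
  induction l1 with
  | nil => intro l2 _ _ _; simp [isOppositeLoopA, isOppositeGoB]
  | cons c1 t1 ih =>
    intro l2 hlen h1 h2
    cases l2 with
    | nil => simp at hlen
    | cons c2 t2 =>
      simp only [List.length_cons, Nat.add_right_cancel_iff] at hlen
      simp only [List.all_cons, Bool.and_eq_true] at h1 h2
      rw [List.zip_cons_cons]
      show (if (decide (PySem.Chars.lowerChar c1 ≠ PySem.Chars.lowerChar c2) || c1 == c2) = true then
              false else isOppositeLoopA (t1.zip t2))
        = (PySem.Chars.isalpha c1 && (c1.toNat ^^^ 32 == c2.toNat) && isOppositeGoB t1 t2)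
      rw [← ih t2 hlen h1.2 h2.2, perchar c1 c2 h1.1 h2.1]
      cases hc : (decide (PySem.Chars.lowerChar c1 ≠ PySem.Chars.lowerChar c2) || c1 == c2) <;>
        simp

-- ===== VERDICT =====
theorem is_opposite_spec : Claim_equal_is_opposite := by
  intro s1 s2 hdom
  have hd : pvDomStr s1 = true ∧ pvDomStr s2 = true := by
    simpa [Dom_is_opposite, Bool.and_eq_true] using hdom
  unfold Spec_is_opposite is_opposite is_opposite_alt
  by_cases hlen : s1.toList.length = s2.toList.length
  · by_cases h1 : s1.toList.isEmpty = true
    · have h2 : s2.toList.isEmpty = true := by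
        cases e1 : s1.toList <;> cases e2 : s2.toList <;> simp_all
      rw [if_pos (by simp [h1]), if_pos (by simp [hlen, h1])]
    · have h2 : s2.toList.isEmpty = false := by
        cases e1 : s1.toList <;> cases e2 : s2.toList <;> simp_all
      rw [if_neg (by simp [h1, h2]), if_neg (by simp [hlen]),
        if_neg (by simp [hlen, h1])]
      exact loop_eq _ _ hlen hd.1 hd.2
  · have hg : (decide (¬s1.toList.length = s2.toList.length) || s1.toList.isEmpty) = true := by
      rw [decide_eq_true hlen, Bool.true_or]
    rw [if_pos hg]
    by_cases h1 : s1.toList.isEmpty = true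
    · rw [if_pos (by simp [h1])]
    · by_cases h2 : s2.toList.isEmpty = true
      · rw [if_pos (by simp [h2])]
      · rw [if_neg (by simp [h1, h2]), if_pos hlen]
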